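-- pv_equiv track=rewrite | github.com/OGR38/AoC2022 | Day1.py | make_liste_cumul
-- ===== SOURCE A (Python) =====
-- def make_liste_cumul(liste):
--     cumul_lec=[]
--     current_counter=0
--     for depth in liste:
--         if depth=="\n":
--             cumul_lec.append(current_counter)
--             current_counter=0
--         else:
--             current_counter=current_counter+int(depth)
--     cumul_lec.append(current_counter)
--     return(cumul_lec)
-- ===== SOURCE B (Python) =====
-- def make_liste_cumul(liste):
--     if "\n" not in liste:
--         return [sum(int(x) for x in liste)]
--     k = liste.index("\n")
--     return [sum(int(x) for x in liste[:k])] + make_liste_cumul(liste[k + 1:])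
-- ===== Notes on version B (the rewrite author's own statement) =====
-- stated objective: alternative
-- what changed: A does one imperative scan with an inline running counter and an output list; B is recursive: it finds the first '\n', sums the prefix segment in one shot, and recurses on the suffix after the separator (base case: no separator left).
import Mathlib
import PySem

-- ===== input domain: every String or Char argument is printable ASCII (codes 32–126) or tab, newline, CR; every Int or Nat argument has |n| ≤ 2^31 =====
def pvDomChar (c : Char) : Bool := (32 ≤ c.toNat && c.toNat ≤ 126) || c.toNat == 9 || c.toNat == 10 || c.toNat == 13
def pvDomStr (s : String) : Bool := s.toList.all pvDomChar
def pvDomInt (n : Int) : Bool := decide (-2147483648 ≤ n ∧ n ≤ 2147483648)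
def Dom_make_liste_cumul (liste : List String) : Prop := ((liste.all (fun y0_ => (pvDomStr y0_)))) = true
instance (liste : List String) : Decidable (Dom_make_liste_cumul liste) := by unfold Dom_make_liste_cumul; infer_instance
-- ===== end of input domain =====

-- B replaces A's single imperative scan (running counter + output list) by a
-- recursion that splits at the first '\n' and sums each segment; same cost.

-- ===== PORT A =====
-- int(depth); inside Pre_ the parse always succeeds, so getD 0 is never the default.
def pvInt (s : String) : Int := (PySem.Int.ofStr? s).getD 0

def make_liste_cumul (liste : List String) : List Int :=
  let st := liste.foldl
    (fun (p : List Int × Int) depth =>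
      if depth = "\n" then (p.1 ++ [p.2], 0) else (p.1, p.2 + pvInt depth))
    ([], 0)
  st.1 ++ [st.2]

-- ===== PORT B =====
-- sum(int(x) for x in seg)
def pvSegSum (seg : List String) : Int := seg.foldl (fun a x => a + pvInt x) 0

-- liste[:k] / liste[k+1:] with the nonnegative index k from liste.index("\n")
-- are exactly take k / drop (k+1) (PySem.List.slice_to_natCast / slice_from_natCast).
def make_liste_cumul_alt (liste : List String) : List Int :=
  match h : PySem.List.index? liste "\n" with
  | none => [pvSegSum liste]
  | some k =>
      pvSegSum (liste.take k) :: make_liste_cumul_alt (liste.drop (k + 1))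
termination_by liste.length
decreasing_by
  have hk : k < liste.length := by
    have := PySem.List.getElem_of_index?_eq_some h
    exact this.1
  simp [List.length_drop]; omega

-- ===== PRECONDITION & SPEC =====
-- Pre_ excludes exactly the inputs on which A's int(depth) raises ValueError.
def Pre_make_liste_cumul (liste : List String) : Prop :=
  ∀ s ∈ liste, s = "\n" ∨ (PySem.Int.ofStr? s).isSome = true
instance (liste : List String) : Decidable (Pre_make_liste_cumul liste) := by
  unfold Pre_make_liste_cumul; infer_instance

def pvWitness_make_liste_cumul : List String := ["1", "2", "\n", "3"]

def Spec_make_liste_cumul (liste : List String) (out : List Int) : Prop := out = make_liste_cumul_alt liste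
instance (liste : List String) (out : List Int) : Decidable (Spec_make_liste_cumul liste out) := by unfold Spec_make_liste_cumul; infer_instance

-- ===== CLAIM (what is proved, stated in full; the proofs are below) =====
def Claim_equal_make_liste_cumul : Prop := ∀ (liste : List String), Dom_make_liste_cumul liste → Pre_make_liste_cumul liste → Spec_make_liste_cumul liste (make_liste_cumul liste)

-- ===== LEMMAS AND PROOFS =====

-- A's fold step, named for the lemmas below.
def stepA (p : List Int × Int) (depth : String) : List Int × Int :=
  if depth = "\n" then (p.1 ++ [p.2], 0) else (p.1, p.2 + pvInt depth)

theorem make_liste_cumul_eq_go (liste : List String) :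
    make_liste_cumul liste =
      (liste.foldl stepA ([], 0)).1 ++ [(liste.foldl stepA ([], 0)).2] := rfl

-- the accumulator list only grows at the front
theorem foldA_acc (l : List String) (acc : List Int) (c : Int) :
    (l.foldl stepA (acc, c)).1 ++ [(l.foldl stepA (acc, c)).2]
      = acc ++ ((l.foldl stepA ([], c)).1 ++ [(l.foldl stepA ([], c)).2]) := by
  induction l generalizing acc c with
  | nil => simp
  | cons d rest ih =>
    by_cases hd : d = "\n"
    · subst hd
      have e1 : stepA (acc, c) "\n" = (acc ++ [c], 0) := by simp [stepA]
      have e2 : stepA (([] : List Int), c) "\n" = ([c], 0) := by simp [stepA]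
      simp only [List.foldl_cons, e1, e2]
      rw [ih (acc ++ [c]), ih [c]]
      simp
    · simp only [List.foldl_cons, stepA, if_neg hd]
      rw [ih acc, ih []]

-- a segment without '\n' just adds its sum to the counter
theorem foldA_no_nl (l : List String) (h : "\n" ∉ l) (acc : List Int) (c : Int) :
    l.foldl stepA (acc, c) = (acc, c + pvSegSum l) := by
  induction l generalizing acc c with
  | nil => simp [pvSegSum]
  | cons d rest ih =>
    have hd : d ≠ "\n" := fun hdd => h (hdd ▸ List.mem_cons_self)
    have hrest : "\n" ∉ rest := fun hm => h (List.mem_cons_of_mem _ hm)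
    simp only [List.foldl_cons, stepA, if_neg hd]
    rw [ih hrest]
    have : pvSegSum (d :: rest) = pvInt d + pvSegSum rest := by
      simp only [pvSegSum, List.foldl_cons]
      have shift : ∀ (m : List String) (a : Int),
          m.foldl (fun a x => a + pvInt x) a = a + m.foldl (fun a x => a + pvInt x) 0 := by
        intro m
        induction m with
        | nil => simp
        | cons y ys ihm => intro a; simp only [List.foldl_cons]; rw [ihm, ihm (0 + pvInt y)]; ring
      rw [shift rest (0 + pvInt d)]; ring
    rw [this]; ring_nf

theorem alt_eq_none (liste : List String)
    (h : PySem.List.index? liste "\n" = none) :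
    make_liste_cumul_alt liste = [pvSegSum liste] := by
  rw [make_liste_cumul_alt]
  split
  · rfl
  · rename_i k h'; rw [h'] at h; cases h

theorem alt_eq_some (liste : List String) (k : Nat)
    (h : PySem.List.index? liste "\n" = some k) :
    make_liste_cumul_alt liste
      = pvSegSum (liste.take k) :: make_liste_cumul_alt (liste.drop (k + 1)) := by
  rw [make_liste_cumul_alt]
  split
  · rename_i h'; rw [h'] at h; cases h
  · rename_i k' h'; rw [h'] at h; cases h; rfl

theorem main_eq (liste : List String) :
    make_liste_cumul liste = make_liste_cumul_alt liste := by
  induction hn : liste.length using Nat.strong_induction_on generalizing liste with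
  | _ n ih =>
  cases hidx : PySem.List.index? liste "\n" with
  | none =>
    have hnm : "\n" ∉ liste := (PySem.List.index?_eq_none_iff _ _).1 hidx
    rw [alt_eq_none liste hidx, make_liste_cumul_eq_go, foldA_no_nl liste hnm]
    simp
  | some k =>
    obtain ⟨pre, suf, hsplit, hlen, hpre⟩ := (PySem.List.index?_eq_some_iff _ _ _).1 hidx
    have htake : liste.take k = pre := by
      rw [hsplit, ← hlen, List.take_left]
    have hdrop : liste.drop (k + 1) = suf := by
      have h2 : liste = (pre ++ ["\n"]) ++ suf := by rw [hsplit]; simp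
      have h3 : k + 1 = (pre ++ ["\n"]).length := by simp [← hlen]
      rw [h2, h3, List.drop_left]
    have hsuf : make_liste_cumul suf = make_liste_cumul_alt suf := by
      apply ih suf.length ?_ suf rfl
      have hl := congrArg List.length hsplit
      simp at hl
      omega
    rw [alt_eq_some liste k hidx, htake, hdrop, make_liste_cumul_eq_go, hsplit,
        List.foldl_append, foldA_no_nl pre hpre, List.foldl_cons]
    have hstep : stepA ([], (0 : Int) + pvSegSum pre) "\n" = ([0 + pvSegSum pre], 0) := by
      simp [stepA]
    rw [hstep, foldA_acc suf [0 + pvSegSum pre] 0]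
    rw [make_liste_cumul_eq_go] at hsuf
    rw [hsuf]
    simp

-- ===== VERDICT (by name: the statement is the Claim_ definition above) =====
theorem make_liste_cumul_spec : Claim_equal_make_liste_cumul := by
  intro liste _ _
  exact main_eq liste
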